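-- pv_equiv track=rewrite | github.com/iszh2023/Block-Blasters | llsp3_converter.py | _determine_imports
-- ===== SOURCE A (Python) =====
-- from typing import Dict, List, Any, Optional
--
-- def _determine_imports(blocks: List[Dict]) -> set:
--     """Determine which imports are needed based on blocks"""
--     imports = set()
--
--     for block in blocks:
--         block_type = block['type']
--
--         if any(keyword in block_type for keyword in ['motor', 'led', 'sound', 'sensor', 'display']):
--             imports.add('from spike import PrimeHub')
--
--         if 'wait' in block_type:
--             imports.add('import time')
--
--         if any(keyword in block_type for keyword in ['math', 'calculation']):
--             imports.add('import math')
--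
--     return imports
-- ===== SOURCE B (Python) =====
-- # B: worklist algorithm — keep the rules still unsatisfied, drop each rule on its first
-- # triggering block, and stop scanning blocks entirely once every import is decided.
-- _RULES = [
--     (('motor', 'led', 'sound', 'sensor', 'display'), 'from spike import PrimeHub'),
--     (('wait',), 'import time'),
--     (('math', 'calculation'), 'import math'),
-- ]
--
-- def _determine_imports(blocks):
--     pending = list(_RULES)
--     found = []
--     for block in blocks:
--         if not pending:
--             break  # every possible import already decided
--         t = block['type']
--         still = []
--         for kws, imp in pending:
--             if any(k in t for k in kws):
--                 found.append(imp)
--             else: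
--                 still.append((kws, imp))
--         pending = still
--     return set(found)
-- ===== Notes on version B (the rewrite author's own statement) =====
-- stated objective: alternative
-- what changed: Replaces A's grow-only set with every rule re-tested on every block by a shrinking worklist of unsatisfied rules: each rule is removed on its first triggering block and the block scan stops early once no rules remain; the imports are collected in a list and turned into a set at the end.
import Mathlib
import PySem

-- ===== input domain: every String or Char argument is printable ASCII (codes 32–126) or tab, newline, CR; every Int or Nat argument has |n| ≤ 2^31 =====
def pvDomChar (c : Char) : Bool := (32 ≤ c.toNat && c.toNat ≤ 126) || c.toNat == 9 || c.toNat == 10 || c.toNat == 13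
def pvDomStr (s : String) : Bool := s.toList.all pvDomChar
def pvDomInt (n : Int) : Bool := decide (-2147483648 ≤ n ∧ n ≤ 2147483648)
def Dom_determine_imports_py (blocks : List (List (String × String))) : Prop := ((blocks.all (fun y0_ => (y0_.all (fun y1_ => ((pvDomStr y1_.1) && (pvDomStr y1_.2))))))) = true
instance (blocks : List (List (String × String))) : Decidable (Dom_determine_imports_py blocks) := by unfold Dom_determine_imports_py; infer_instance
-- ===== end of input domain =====

-- B replaces A's per-block re-test of every rule by a shrinking worklist of unsatisfied rules with early exit (alternative decomposition, same cost class).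


-- ===== PORT A =====
-- block['type']; under Pre_ the key is present, so .getD "" is never reached.
def pvBlockType (block : List (String × String)) : String :=
  ((PySem.Dict.mk block).get? "type").getD ""

-- the body of A's for-loop (three conditional set-adds)
def pvStepA (imports : List String) (block : List (String × String)) : List String :=
  let block_type := pvBlockType block
  let imports :=
    if (["motor", "led", "sound", "sensor", "display"].any
          (fun keyword => PySem.Str.isIn keyword block_type)) then
      PySem.Set.add imports "from spike import PrimeHub"
    else imports
  let imports :=
    if PySem.Str.isIn "wait" block_type then
      PySem.Set.add imports "import time"
    else imports
  if (["math", "calculation"].any (fun keyword => PySem.Str.isIn keyword block_type)) then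
    PySem.Set.add imports "import math"
  else imports

def determine_imports_py (blocks : List (List (String × String))) : List String :=
  blocks.foldl pvStepA PySem.Set.empty

-- ===== PORT B =====
def pvRules : List (List String × String) :=
  [(["motor", "led", "sound", "sensor", "display"], "from spike import PrimeHub"),
   (["wait"], "import time"),
   (["math", "calculation"], "import math")]

-- the for-loop over blocks: pending = rules not yet satisfied, found = imports in discovery order; breaks when pending is empty
def pvLoopB : List (List (String × String)) → List (List String × String) → List String → List String
  | [], _, found => found
  | block :: rest, pending, found =>
    if pending.isEmpty then found
    else
      let t := pvBlockType block
      let step := pending.foldl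
        (fun acc r =>
          if r.1.any (fun k => PySem.Str.isIn k t) then (acc.1 ++ [r.2], acc.2)
          else (acc.1, acc.2 ++ [r]))
        (found, [])
      pvLoopB rest step.2 step.1

def determine_imports_py_alt (blocks : List (List (String × String))) : List String :=
  PySem.Set.ofList (pvLoopB blocks pvRules [])

-- ===== PRECONDITION & SPEC =====
-- Pre_ excludes exactly the inputs where A raises KeyError: a block without a "type" key.
def Pre_determine_imports_py (blocks : List (List (String × String))) : Prop :=
  ∀ block ∈ blocks, ((PySem.Dict.mk block).get? "type").isSome = true
instance (blocks : List (List (String × String))) : Decidable (Pre_determine_imports_py blocks) := by unfold Pre_determine_imports_py; infer_instance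

def pvWitness_determine_imports_py : (List (List (String × String))) :=
  [[("type", "motor_wait")], [("type", "math")]]

def Spec_determine_imports_py (blocks : List (List (String × String))) (out : List String) : Prop := out = determine_imports_py_alt blocks
instance (blocks : List (List (String × String))) (out : List String) : Decidable (Spec_determine_imports_py blocks out) := by unfold Spec_determine_imports_py; infer_instance

-- ===== CLAIM (what is proved, stated in full; the proofs are below) =====
def Claim_equal_determine_imports_py : Prop := ∀ (blocks : List (List (String × String))), Dom_determine_imports_py blocks → Pre_determine_imports_py blocks → Spec_determine_imports_py blocks (determine_imports_py blocks)

-- ===== LEMMAS AND PROOFS =====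

-- abbreviation for "rule r is triggered by block"
def pvTrig (block : List (String × String)) (r : List String × String) : Bool :=
  r.1.any (fun k => PySem.Str.isIn k (pvBlockType block))

-- B's inner loop is a partition: found gains the triggered imports, still keeps the rest
lemma pv_inner (block : List (String × String)) (pending : List (List String × String)) :
    ∀ (found : List String) (still : List (List String × String)),
    pending.foldl
      (fun acc r =>
        if r.1.any (fun k => PySem.Str.isIn k (pvBlockType block)) then (acc.1 ++ [r.2], acc.2)
        else (acc.1, acc.2 ++ [r]))
      (found, still)
    = (found ++ (pending.filter (pvTrig block)).map (·.2),
       still ++ pending.filter (fun r => !(pvTrig block r))) := by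
  induction pending with
  | nil => intro found still; simp
  | cons r rest ih =>
    intro found still
    have ht : (r.1.any (fun k => PySem.Str.isIn k (pvBlockType block))) = pvTrig block r := rfl
    cases h : pvTrig block r <;>
      simp only [List.foldl_cons, List.filter_cons, ht, h, Bool.not_false, Bool.not_true,
        if_true, if_false, Bool.false_eq_true, List.map_cons, ih] <;>
      simp

-- A's loop body appends exactly the imports of the still-pending rules triggered by the block
lemma pv_step (s : List String) (block : List (String × String)) :
    pvStepA s block
    = s ++ (((pvRules.filter (fun r => !(s.contains r.2))).filter (pvTrig block)).map (·.2)) := by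
  have e1 : (["motor", "led", "sound", "sensor", "display"].any
      (fun keyword => PySem.Str.isIn keyword (pvBlockType block)))
      = pvTrig block (["motor", "led", "sound", "sensor", "display"], "from spike import PrimeHub") := rfl
  have e2 : PySem.Str.isIn "wait" (pvBlockType block)
      = pvTrig block (["wait"], "import time") := by simp [pvTrig]
  have e3 : (["math", "calculation"].any
      (fun keyword => PySem.Str.isIn keyword (pvBlockType block)))
      = pvTrig block (["math", "calculation"], "import math") := rfl
  unfold pvStepA
  dsimp only
  rw [e1, e2, e3]
  by_cases h1 : "from spike import PrimeHub" ∈ s <;>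
  by_cases h2 : "import time" ∈ s <;>
  by_cases h3 : "import math" ∈ s <;>
  cases t1 : pvTrig block (["motor", "led", "sound", "sensor", "display"], "from spike import PrimeHub") <;>
  cases t2 : pvTrig block (["wait"], "import time") <;>
  cases t3 : pvTrig block (["math", "calculation"], "import math") <;>
  simp [pvRules, PySem.Set.add, t1, t2, t3, h1, h2, h3]

-- after the block, the still-pending rules are exactly the rules not yet in A's new set
lemma pv_pending (s : List String) (block : List (String × String)) :
    (pvRules.filter (fun r => !(s.contains r.2))).filter (fun r => !(pvTrig block r))
    = pvRules.filter (fun r => !((pvStepA s block).contains r.2)) := by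
  rw [pv_step s block]
  by_cases h1 : "from spike import PrimeHub" ∈ s <;>
  by_cases h2 : "import time" ∈ s <;>
  by_cases h3 : "import math" ∈ s <;>
  cases t1 : pvTrig block (["motor", "led", "sound", "sensor", "display"], "from spike import PrimeHub") <;>
  cases t2 : pvTrig block (["wait"], "import time") <;>
  cases t3 : pvTrig block (["math", "calculation"], "import math") <;>
  simp [pvRules, t1, t2, t3, h1, h2, h3]

-- when every rule import is already in s, A's body does nothing
lemma pv_step_done (s : List String) (block : List (String × String))
    (h : pvRules.filter (fun r => !(s.contains r.2)) = []) : pvStepA s block = s := by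
  have := pv_step s block
  rw [h] at this
  simpa using this

lemma pv_fold_done (blocks : List (List (String × String))) (s : List String)
    (h : pvRules.filter (fun r => !(s.contains r.2)) = []) :
    blocks.foldl pvStepA s = s := by
  induction blocks with
  | nil => rfl
  | cons b rest ih => simp [List.foldl_cons, pv_step_done s b h, ih]

-- main invariant: B's loop with pending = the rules whose import is not yet in s computes A's fold
lemma pv_main (blocks : List (List (String × String))) :
    ∀ (s : List String),
    pvLoopB blocks (pvRules.filter (fun r => !(s.contains r.2))) s = blocks.foldl pvStepA s := by
  induction blocks with
  | nil => intro s; rfl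
  | cons block rest ih =>
    intro s
    rw [pvLoopB]
    by_cases h : (pvRules.filter (fun r => !(s.contains r.2))).isEmpty
    · rw [if_pos h]
      rw [List.foldl_cons, pv_step_done s block (List.isEmpty_iff.mp h),
        pv_fold_done rest s (List.isEmpty_iff.mp h)]
    · rw [if_neg h]
      simp only [pv_inner block _ s []]
      rw [List.nil_append, pv_pending s block, ← pv_step s block, ih (pvStepA s block),
        List.foldl_cons]

-- A's fold keeps the set Nodup
lemma pv_fold_nodup (blocks : List (List (String × String))) :
    ∀ (s : List String), s.Nodup → (blocks.foldl pvStepA s).Nodup := by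
  induction blocks with
  | nil => intro s hs; exact hs
  | cons block rest ih =>
    intro s hs
    refine ih _ ?_
    unfold pvStepA
    dsimp only
    split <;> split <;> split <;>
      first
        | exact PySem.Set.nodup_add _ _ (PySem.Set.nodup_add _ _ (PySem.Set.nodup_add _ _ hs))
        | exact PySem.Set.nodup_add _ _ (PySem.Set.nodup_add _ _ hs)
        | exact PySem.Set.nodup_add _ _ hs
        | exact hs

-- ===== VERDICT (by name: the statement is the Claim_ definition above) =====
theorem determine_imports_py_spec : Claim_equal_determine_imports_py := by
  intro blocks _ _
  unfold Spec_determine_imports_py determine_imports_py determine_imports_py_alt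
  have hrules : pvRules = pvRules.filter (fun r => !(([] : List String).contains r.2)) := rfl
  rw [hrules, pv_main blocks []]
  exact Eq.symm (PySem.Set.ofList_eq_self_of_nodup _ (pv_fold_nodup blocks [] List.nodup_nil))
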